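-- pv_equiv track=rewrite | github.com/eukaryo/ostle_solver | ostle_misc.py | pdep
-- ===== SOURCE A (Python) =====
-- def pdep(a: int, mask: int) -> int:
--     dest = 0
--     k = 0
--     for m in range(64):
--         if (mask & (1 << m)) != 0:
--             if (a & (1 << k)) != 0:
--                 dest += 1 << m
--             k += 1
--     return dest
-- ===== SOURCE B (Python) =====
-- def pdep(a: int, mask: int) -> int:
--     # Deposit the low bits of a into the set bit positions of mask (low 64 bits),
--     # iterating over the set bits of mask only instead of all 64 positions.
--     mask &= (1 << 64) - 1
--     dest = 0
--     while mask:
--         rest = mask & (mask - 1)      # mask with its lowest set bit cleared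
--         if a & 1:
--             dest += mask - rest       # value of that lowest set bit
--         a >>= 1
--         mask = rest
--     return dest
-- ===== Notes on version B (the rewrite author's own statement) =====
-- stated objective: alternative
-- what changed: Instead of scanning all 64 bit positions with an index counter k, B clamps mask to 64 bits and loops only over the set bits of mask, clearing the lowest set bit (mask & (mask-1)) and shifting a right by one each step.
import Mathlib
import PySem

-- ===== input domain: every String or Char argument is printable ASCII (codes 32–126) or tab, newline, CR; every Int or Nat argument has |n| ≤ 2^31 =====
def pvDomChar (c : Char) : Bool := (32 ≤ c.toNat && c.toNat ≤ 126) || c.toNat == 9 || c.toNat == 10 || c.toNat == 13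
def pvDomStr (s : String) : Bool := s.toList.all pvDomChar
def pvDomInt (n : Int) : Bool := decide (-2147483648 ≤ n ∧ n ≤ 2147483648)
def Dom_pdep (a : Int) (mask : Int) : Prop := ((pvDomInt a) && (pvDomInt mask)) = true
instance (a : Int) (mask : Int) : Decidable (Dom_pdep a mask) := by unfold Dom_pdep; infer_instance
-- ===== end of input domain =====

-- B clamps mask to its low 64 bits and iterates over the set bits of mask only
-- (clearing the lowest set bit each round) instead of scanning all 64 positions.

-- ===== PORT A =====
-- Python's m (from range(64)) and the counter k are only ever 0..64 here; they are
-- kept as ℕ because they are used as shift amounts. 'a & x' is PySem.Int.band.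
def pdep (a : Int) (mask : Int) : Int :=
  ((List.range 64).foldl
    (fun (s : Int × Nat) (m : Nat) =>
      if PySem.Int.band mask ((1 : Int) <<< m) ≠ 0 then
        (if PySem.Int.band a ((1 : Int) <<< s.2) ≠ 0 then s.1 + ((1 : Int) <<< m) else s.1,
         s.2 + 1)
      else s)
    (0, 0)).1

-- ===== PORT B =====
-- the while loop of Source B; the clamped mask is nonnegative, so it is carried as a ℕ
-- (same value as the Python int).
def pdepAltGo (a : Int) (mask : Nat) (dest : Int) : Int :=
  if mask = 0 then dest
  else
    let rest := mask &&& (mask - 1)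
    pdepAltGo (a >>> (1 : Nat)) rest
      (if PySem.Int.band a 1 ≠ 0 then dest + ((mask - rest : Nat) : Int) else dest)
termination_by mask
decreasing_by
  have h := Nat.and_le_right (n := mask) (m := mask - 1)
  omega

def pdep_alt (a : Int) (mask : Int) : Int :=
  -- mask &= (1 << 64) - 1
  pdepAltGo a (PySem.Int.band mask (((1 : Int) <<< (64 : Nat)) - 1)).toNat 0

-- ===== PRECONDITION & SPEC =====
def Spec_pdep (a : Int) (mask : Int) (out : Int) : Prop := out = pdep_alt a mask
instance (a : Int) (mask : Int) (out : Int) : Decidable (Spec_pdep a mask out) := by unfold Spec_pdep; infer_instance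

-- ===== CLAIM (what is proved, stated in full; the proofs are below) =====
def Claim_equal_pdep : Prop := ∀ (a : Int) (mask : Int), Dom_pdep a mask → Spec_pdep a mask (pdep a mask)

-- ===== LEMMAS AND PROOFS =====

-- the common reference function: deposit bits of a into the (Nat) mask m, low bit first
def pdepPD (a : Int) (m : Nat) : Int :=
  if m = 0 then 0
  else if m % 2 = 1 then (if a.testBit 0 then 1 else 0) + 2 * pdepPD (a >>> (1 : Nat)) (m / 2)
  else 2 * pdepPD a (m / 2)
termination_by m
decreasing_by all_goals omega

theorem pdepPD_zero (a : Int) : pdepPD a 0 = 0 := by unfold pdepPD; simp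

theorem pdepPD_odd (a : Int) (m : Nat) (h : m % 2 = 1) :
    pdepPD a m = (if a.testBit 0 then 1 else 0) + 2 * pdepPD (a >>> (1 : Nat)) (m / 2) := by
  have h0 : ¬ (m = 0) := by omega
  rw [pdepPD, if_neg h0, if_pos h]

theorem pdepPD_even (a : Int) (m : Nat) (h : m % 2 = 0) :
    pdepPD a m = 2 * pdepPD a (m / 2) := by
  by_cases h0 : m = 0
  · subst h0; rw [pdepPD_zero]; simp [pdepPD_zero]
  · have h1 : ¬ (m % 2 = 1) := by omega
    rw [pdepPD, if_neg h0, if_neg h1]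

-- ----- Int bit-access bridges (for the core ℤ >>> ℕ / <<< ℕ and PySem.Int.band) -----

theorem sl_one (n : Nat) : ((1 : Int) <<< n) = ((2 ^ n : Nat) : Int) := by
  have h : ((1 : Int) <<< n) = ((1 <<< n : Nat) : Int) := rfl
  rw [h, Nat.shiftLeft_eq, Nat.one_mul]

theorem tb_natCast (p n : Nat) : ((p : Int)).testBit n = p.testBit n := rfl

theorem tb_negSucc (p n : Nat) : (Int.negSucc p).testBit n = !p.testBit n := rfl

theorem sr_ofNat (p n : Nat) : ((p : Int)) >>> (n : Nat) = ((p >>> n : Nat) : Int) := rfl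

theorem sr_negSucc (p n : Nat) : (Int.negSucc p) >>> (n : Nat) = Int.negSucc (p >>> n) := rfl

theorem tb_shiftRight (x : Int) (n i : Nat) : (x >>> (n : Nat)).testBit i = x.testBit (n + i) := by
  cases x with
  | ofNat p => rw [Int.ofNat_eq_natCast, sr_ofNat, tb_natCast, tb_natCast, Nat.testBit_shiftRight]
  | negSucc p => rw [sr_negSucc, tb_negSucc, tb_negSucc, Nat.testBit_shiftRight]

theorem sr_sr (x : Int) (n : Nat) : (x >>> (n : Nat)) >>> (1 : Nat) = x >>> (n + 1 : Nat) := by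
  cases x with
  | ofNat p =>
      rw [Int.ofNat_eq_natCast, sr_ofNat, sr_ofNat, sr_ofNat, Nat.shiftRight_add]
  | negSucc p => rw [sr_negSucc, sr_negSucc, sr_negSucc, Nat.shiftRight_add]

theorem sr_zero (x : Int) : x >>> (0 : Nat) = x := by
  cases x with
  | ofNat p => rfl
  | negSucc p => rfl

theorem band_two_pow (x : Int) (n : Nat) :
    PySem.Int.band x ((1 : Int) <<< n) = if x.testBit n then ((2 ^ n : Nat) : Int) else 0 := by
  rw [sl_one]
  cases x with
  | ofNat p =>
      rw [Int.ofNat_eq_natCast, PySem.Int.band_natCast, tb_natCast, Nat.and_two_pow]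
      cases hp : p.testBit n <;> simp
  | negSucc p =>
      have hneg : ¬ (0 : Int) ≤ Int.negSucc p := by
        rw [Int.not_le]; exact Int.negSucc_lt_zero p
      have hpos : (0 : Int) ≤ ((2 ^ n : Nat) : Int) := by positivity
      unfold PySem.Int.band
      rw [if_neg hneg, if_pos hpos]
      have h1 : (-(Int.negSucc p) - 1).toNat = p := by rw [Int.negSucc_eq]; omega
      have h2 : (((2 ^ n : Nat) : Int)).toNat = 2 ^ n := Int.toNat_natCast _
      rw [h1, h2, Nat.two_pow_and, tb_negSucc]
      cases hp : p.testBit n <;> simp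

theorem band_two_pow_ne (x : Int) (n : Nat) :
    (PySem.Int.band x ((1 : Int) <<< n) ≠ 0) ↔ x.testBit n = true := by
  rw [band_two_pow]
  by_cases h : x.testBit n <;> simp [h] <;> positivity

theorem band_one_ne (x : Int) : (PySem.Int.band x 1 ≠ 0) ↔ x.testBit 0 = true := by
  have : (1 : Int) = (1 : Int) <<< (0 : Nat) := rfl
  rw [this, band_two_pow_ne]

-- ----- the clamped mask -----

def clamp64 (mask : Int) : Nat := (PySem.Int.band mask (((1 : Int) <<< (64 : Nat)) - 1)).toNat

theorem ones64 : (((1 : Int) <<< (64 : Nat)) - 1) = ((2 ^ 64 - 1 : Nat) : Int) := by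
  rw [sl_one]
  have h : (1 : Nat) ≤ 2 ^ 64 := Nat.one_le_two_pow
  push_cast [h]

theorem clamp64_eq (mask : Int) :
    clamp64 mask = if 0 ≤ mask then mask.toNat &&& (2 ^ 64 - 1)
      else 2 ^ 64 - (((2 ^ 64 - 1) &&& (-mask - 1).toNat) + 1) := by
  unfold clamp64
  rw [ones64]
  by_cases h : 0 ≤ mask
  · rw [PySem.Int.band_of_nonneg h (by positivity), if_pos h]
    simp
  · unfold PySem.Int.band
    rw [if_neg h, if_pos (by positivity : (0:Int) ≤ ((2 ^ 64 - 1 : Nat) : Int)), if_neg h]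
    have h2 : (((2 ^ 64 - 1 : Nat) : Int)).toNat = 2 ^ 64 - 1 := Int.toNat_natCast _
    rw [h2, Int.toNat_natCast]
    have h3 : (2 ^ 64 - 1) &&& (-mask - 1).toNat ≤ 2 ^ 64 - 1 := Nat.and_le_left
    omega

theorem clamp64_testBit (mask : Int) (i : Nat) :
    (clamp64 mask).testBit i = (decide (i < 64) && mask.testBit i) := by
  rw [clamp64_eq]
  by_cases h : 0 ≤ mask
  · rw [if_pos h]
    have hm : mask = ((mask.toNat : Nat) : Int) := (Int.toNat_of_nonneg h).symm
    rw [Nat.testBit_and, Nat.testBit_two_pow_sub_one]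
    conv_rhs => rw [hm, tb_natCast]
    exact Bool.and_comm _ _
  · rw [if_neg h]
    have hmn : mask = Int.negSucc ((-mask - 1).toNat) := by
      cases mask with
      | ofNat p => exact absurd (Int.natCast_nonneg p) h
      | negSucc p =>
          have : (-(Int.negSucc p) - 1).toNat = p := by rw [Int.negSucc_eq]; omega
          rw [this]
    have hy : (2 ^ 64 - 1) &&& (-mask - 1).toNat < 2 ^ 64 := by
      have := Nat.and_le_left (n := 2 ^ 64 - 1) (m := (-mask - 1).toNat)
      omega
    rw [Nat.testBit_two_pow_sub_succ hy]
    conv_rhs => rw [hmn, tb_negSucc]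
    rw [Nat.testBit_and, Nat.testBit_two_pow_sub_one]
    by_cases hi : i < 64 <;> simp [hi]

theorem clamp64_lt (mask : Int) : clamp64 mask < 2 ^ 64 := by
  rw [clamp64_eq]
  by_cases h : 0 ≤ mask
  · rw [if_pos h]
    have := Nat.and_le_right (n := mask.toNat) (m := 2 ^ 64 - 1)
    omega
  · rw [if_neg h]
    omega

-- ----- B-side: Kernighan loop = pdepPD -----

theorem and_pred_odd (m : Nat) (h : m % 2 = 1) : m &&& (m - 1) = m - 1 := by
  apply Nat.eq_of_testBit_eq
  intro i
  cases i with
  | zero => simp [Nat.testBit_and, Nat.testBit_zero]; omega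
  | succ i =>
      rw [Nat.testBit_and]
      simp only [Nat.testBit_succ]
      have : (m - 1) / 2 = m / 2 := by omega
      rw [this, Bool.and_self]

theorem and_pred_even (m : Nat) (h : m % 2 = 0) (h0 : m ≠ 0) :
    m &&& (m - 1) = 2 * ((m / 2) &&& (m / 2 - 1)) := by
  apply Nat.eq_of_testBit_eq
  intro i
  cases i with
  | zero => simp [Nat.testBit_and, Nat.testBit_zero]; omega
  | succ i =>
      rw [Nat.testBit_and]
      simp only [Nat.testBit_succ]
      have h2 : 2 * (m / 2 &&& (m / 2 - 1)) / 2 = m / 2 &&& (m / 2 - 1) := by omega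
      rw [h2, Nat.testBit_and]
      have h1 : (m - 1) / 2 = m / 2 - 1 := by omega
      have h2 : 2 * (m / 2 &&& (m / 2 - 1)) / 2 = m / 2 &&& (m / 2 - 1) := by omega
      rw [h1]

theorem go_zero (a d : Int) : pdepAltGo a 0 d = d := by rw [pdepAltGo]; simp

theorem go_ne (a : Int) (m : Nat) (d : Int) (h0 : m ≠ 0) :
    pdepAltGo a m d = pdepAltGo (a >>> (1 : Nat)) (m &&& (m - 1))
      (if PySem.Int.band a 1 ≠ 0 then d + ((m - (m &&& (m - 1)) : Nat) : Int) else d) := by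
  rw [pdepAltGo]
  simp [h0]

theorem and_pred_lt (m : Nat) (h0 : m ≠ 0) : m &&& (m - 1) < m := by
  have := Nat.and_le_right (n := m) (m := m - 1)
  omega

theorem goAcc : ∀ m : Nat, ∀ (a d : Int), pdepAltGo a m d = d + pdepAltGo a m 0 := by
  intro m
  induction m using Nat.strong_induction_on with
  | _ m ih =>
    intro a d
    by_cases h0 : m = 0
    · subst h0; rw [go_zero, go_zero]; ring
    · rw [go_ne a m d h0, go_ne a m 0 h0,
        ih _ (and_pred_lt m h0) (a >>> (1 : Nat))]
      conv_rhs => rw [ih _ (and_pred_lt m h0) (a >>> (1 : Nat))]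
      by_cases hc : PySem.Int.band a 1 ≠ 0 <;> simp [hc] <;> ring

theorem go2 : ∀ t : Nat, ∀ (a d : Int), pdepAltGo a (2 * t) d = d + 2 * pdepAltGo a t 0 := by
  intro t
  induction t using Nat.strong_induction_on with
  | _ t ih =>
    intro a d
    by_cases h0 : t = 0
    · subst h0; rw [Nat.mul_zero, go_zero, go_zero]; ring
    · have h2 : 2 * t ≠ 0 := by omega
      have heven : 2 * t % 2 = 0 := by omega
      have hrest : (2 * t) &&& (2 * t - 1) = 2 * (t &&& (t - 1)) := by
        have := and_pred_even (2 * t) heven h2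
        rwa [show 2 * t / 2 = t from by omega] at this
      rw [go_ne a (2 * t) d h2, go_ne a t 0 h0, hrest,
        ih _ (and_pred_lt t h0) (a >>> (1 : Nat)),
        goAcc _ (a >>> (1 : Nat))]
      conv_rhs => rw [goAcc _ (a >>> (1 : Nat))]
      have hle : t &&& (t - 1) ≤ t := Nat.and_le_left
      have hcast : ((2 * t - 2 * (t &&& (t - 1)) : Nat) : Int)
          = 2 * ((t - (t &&& (t - 1)) : Nat) : Int) := by
        rw [show 2 * t - 2 * (t &&& (t - 1)) = 2 * (t - (t &&& (t - 1))) from by omega]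
        push_cast [hle]
        ring
      rw [hcast]
      by_cases hc : PySem.Int.band a 1 ≠ 0 <;> simp [hc] <;> ring

theorem goPD : ∀ m : Nat, ∀ a : Int, pdepAltGo a m 0 = pdepPD a m := by
  intro m
  induction m using Nat.strong_induction_on with
  | _ m ih =>
    intro a
    by_cases h0 : m = 0
    · subst h0; rw [go_zero, pdepPD_zero]
    · by_cases hodd : m % 2 = 1
      · have hrest : m &&& (m - 1) = m - 1 := and_pred_odd m hodd
        have hsplit : m - 1 = 2 * (m / 2) := by omega
        rw [go_ne a m 0 h0, hrest, hsplit,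
          go2 _ (a >>> (1 : Nat)), ih _ (by omega) (a >>> (1 : Nat)),
          pdepPD_odd a m hodd]
        rw [show ((m - 2 * (m / 2) : Nat) : Int) = 1 from by
          rw [show m - 2 * (m / 2) = 1 from by omega]; exact Nat.cast_one]
        simp only [band_one_ne]
        by_cases hb : a.testBit 0 = true <;> simp [hb]
      · have heven : m % 2 = 0 := by omega
        have hsplit : m = 2 * (m / 2) := by omega
        rw [pdepPD_even a m heven, ← ih (m / 2) (by omega) a]
        conv_lhs => rw [hsplit]
        rw [go2 _ a]
        ring

theorem B_eq (a mask : Int) : pdep_alt a mask = pdepPD a (clamp64 mask) := goPD _ a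

-- ----- A-side: the 64-step fold = pdepPD -----

def stepA (a mask : Int) : Int × Nat → Nat → Int × Nat := fun s m =>
  if PySem.Int.band mask ((1 : Int) <<< m) ≠ 0 then
    (if PySem.Int.band a ((1 : Int) <<< s.2) ≠ 0 then s.1 + ((1 : Int) <<< m) else s.1,
     s.2 + 1)
  else s

theorem cond_bit (mask : Int) (s : Nat) (hs : s < 64) :
    (PySem.Int.band mask ((1 : Int) <<< s) ≠ 0) ↔ (clamp64 mask >>> s) % 2 = 1 := by
  rw [band_two_pow_ne]
  have h1 : (clamp64 mask >>> s).testBit 0 = (clamp64 mask).testBit (s + 0) :=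
    Nat.testBit_shiftRight _
  rw [Nat.add_zero, clamp64_testBit, Nat.testBit_zero] at h1
  simp only [hs, decide_true, Bool.true_and] at h1
  rw [← h1, decide_eq_true_eq]

theorem A_inv (a mask : Int) : ∀ f s : Nat, s + f = 64 → ∀ (k : Nat) (dest : Int),
    ((List.range' s f).foldl (stepA a mask) (dest, k)).1
      = dest + (2 ^ s : Int) * pdepPD (a >>> (k : Nat)) (clamp64 mask >>> s) := by
  intro f
  induction f with
  | zero =>
      intro s hs k dest
      have h64 : s = 64 := by omega
      subst h64
      rw [Nat.shiftRight_eq_zero _ _ (clamp64_lt mask), pdepPD_zero]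
      simp [List.range']
  | succ f ihf =>
      intro s hs k dest
      rw [List.range'_succ, List.foldl_cons]
      have hs64 : s < 64 := by omega
      have hdiv : (clamp64 mask >>> s) / 2 = clamp64 mask >>> (s + 1) :=
        (Nat.shiftRight_succ _ _).symm
      have hpow : ((2 : Int) ^ (s + 1)) = 2 ^ s * 2 := by ring
      by_cases hc : PySem.Int.band mask ((1 : Int) <<< s) ≠ 0
      · have hodd : (clamp64 mask >>> s) % 2 = 1 := (cond_bit mask s hs64).mp hc
        have hstep : stepA a mask (dest, k) s
            = (if PySem.Int.band a ((1 : Int) <<< k) ≠ 0 then dest + ((1 : Int) <<< s) else dest,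
               k + 1) := by
          simp only [stepA, if_pos hc]
        rw [hstep, ihf (s + 1) (by omega) (k + 1) _,
          pdepPD_odd _ _ hodd, hdiv, sr_sr]
        have hbit : ((a >>> (k : Nat)).testBit 0) = a.testBit k := by
          rw [tb_shiftRight, Nat.add_zero]
        rw [hbit]
        have hiff := band_two_pow_ne a k
        by_cases hbb : PySem.Int.band a ((1 : Int) <<< k) ≠ 0
        · have hb : a.testBit k = true := hiff.mp hbb
          rw [if_pos hbb, hb, if_pos rfl, sl_one, hpow]
          push_cast
          ring
        · have hb : ¬ a.testBit k = true := fun h => hbb (hiff.mpr h)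
          rw [if_neg hbb, if_neg hb, hpow]
          ring
      · have heven : (clamp64 mask >>> s) % 2 = 0 := by
          have := (cond_bit mask s hs64).not.mp hc
          omega
        have hstep : stepA a mask (dest, k) s = (dest, k) := by
          simp only [stepA, if_neg hc]
        rw [hstep, ihf (s + 1) (by omega) k dest,
          pdepPD_even _ _ heven, hdiv, hpow]
        ring

theorem A_eq (a mask : Int) : pdep a mask = pdepPD a (clamp64 mask) := by
  have h : pdep a mask = ((List.range' 0 64).foldl (stepA a mask) ((0 : Int), (0 : Nat))).1 := by
    rw [← List.range_eq_range']; rfl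
  rw [h, A_inv a mask 64 0 rfl 0 0, sr_zero]
  simp

-- ===== VERDICT (by name: the statement is the Claim_ definition above) =====
theorem pdep_spec : Claim_equal_pdep := by
  intro a mask _
  unfold Spec_pdep
  rw [A_eq, B_eq]
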